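-- pv_equiv track=rewrite | github.com/DanteBM/Toxic-spans | notebooks/utils.py | starts_ends_tokens
-- ===== SOURCE A (Python) =====
-- def starts_ends_tokens(text):
--     tokens = text.split()
--     starts, ends = [], []
--     start, end = 0, -2
--     for idx, palabra in enumerate(tokens):
--         starts.append(start) # start actual
--         start += len(palabra) + 1 # start para la siguiente
--         end   += len(palabra) + 1 # end actual
--         ends.append(end)
--
--     return starts, ends
-- ===== SOURCE B (Python) =====
-- def starts_ends_tokens(text):
--     # Join the tokens with single spaces, then detect token boundaries by a
--     # character scan: a start where a non-space follows a space, an end where a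
--     # space follows a non-space (plus a final fixup for the last token).
--     s = " ".join(text.split())
--     starts, ends = [], []
--     prev = " "
--     for i, ch in enumerate(s):
--         if ch != " " and prev == " ":
--             starts.append(i)
--         if ch == " " and prev != " ":
--             ends.append(i - 1)
--         prev = ch
--     if prev != " ":
--         ends.append(len(s) - 1)
--     return starts, ends
-- ===== Notes on version B (the rewrite author's own statement) =====
-- stated objective: alternative
-- what changed: B first joins the split tokens back together with single spaces and then finds the offsets by a boundary-detecting character scan over that normalized string (a start at each space-to-nonspace transition, an end at each nonspace-to-space transition), instead of A's per-token accumulation of len(word)+1 into two running counters.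
import Mathlib
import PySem

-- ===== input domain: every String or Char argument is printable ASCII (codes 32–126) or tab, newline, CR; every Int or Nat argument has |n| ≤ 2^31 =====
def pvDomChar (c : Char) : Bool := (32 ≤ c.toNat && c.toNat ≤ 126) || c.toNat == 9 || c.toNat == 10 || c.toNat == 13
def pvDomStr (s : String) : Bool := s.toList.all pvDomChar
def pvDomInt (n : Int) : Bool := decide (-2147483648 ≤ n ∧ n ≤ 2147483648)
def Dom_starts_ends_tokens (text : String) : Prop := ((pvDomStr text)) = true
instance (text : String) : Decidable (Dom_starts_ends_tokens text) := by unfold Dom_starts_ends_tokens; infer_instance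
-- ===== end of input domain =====

-- B replaces A's per-token length accumulators by a boundary-detecting character scan over the
-- single-space-joined token string; objective: alternative.

-- ===== PORT A =====
def starts_ends_tokens (text : String) : List Int × List Int :=
  let tokens := PySem.Str.split₀ text                    -- tokens = text.split()
  let st := tokens.foldl (fun (acc : List Int × List Int × Int × Int) palabra =>
      let starts := acc.1 ++ [acc.2.2.1]                 -- starts.append(start)
      let start := acc.2.2.1 + PySem.Str.len palabra + 1 -- start += len(palabra)+1
      let e := acc.2.2.2 + PySem.Str.len palabra + 1     -- end += len(palabra)+1
      let ends := acc.2.1 ++ [e]                         -- ends.append(end)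
      (starts, ends, start, e)) ([], [], 0, -2)          -- start, end = 0, -2
  (st.1, st.2.1)

-- ===== PORT B =====
def starts_ends_tokens_alt (text : String) : List Int × List Int :=
  let s := PySem.Str.join " " (PySem.Str.split₀ text)    -- s = " ".join(text.split())
  let st := (PySem.List.enumerate s.toList 0).foldl      -- for i, ch in enumerate(s):
    (fun (acc : List Int × List Int × Char) p =>
      let starts := if p.2 != ' ' && acc.2.2 == ' ' then acc.1 ++ [p.1] else acc.1
      let ends := if p.2 == ' ' && acc.2.2 != ' ' then acc.2.1 ++ [p.1 - 1] else acc.2.1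
      (starts, ends, p.2)) ([], [], ' ')                 -- prev = " "
  let ends := if st.2.2 != ' ' then st.2.1 ++ [PySem.Str.len s - 1] else st.2.1
  (st.1, ends)

-- ===== PRECONDITION & SPEC =====
def Spec_starts_ends_tokens (text : String) (out : List Int × List Int) : Prop := out = starts_ends_tokens_alt text
instance (text : String) (out : List Int × List Int) : Decidable (Spec_starts_ends_tokens text out) := by unfold Spec_starts_ends_tokens; infer_instance

-- ===== CLAIM (what is proved, stated in full; the proofs are below) =====
def Claim_equal_starts_ends_tokens : Prop := ∀ (text : String), Dom_starts_ends_tokens text → Spec_starts_ends_tokens text (starts_ends_tokens text)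

-- ===== LEMMAS AND PROOFS =====

-- the common description of both outputs: prefix-sum starts / ends over the token list
def pvS (k : Int) : List (List Char) → List Int
  | [] => []
  | w :: ws => k :: pvS (k + w.length + 1) ws

def pvE (k : Int) : List (List Char) → List Int
  | [] => []
  | w :: ws => (k + w.length - 1) :: pvE (k + w.length + 1) ws

-- B's scan step, named so the loop lemmas can refer to it
def pvStep (acc : List Int × List Int × Char) (p : Int × Char) : List Int × List Int × Char :=
  let starts := if p.2 != ' ' && acc.2.2 == ' ' then acc.1 ++ [p.1] else acc.1
  let ends := if p.2 == ' ' && acc.2.2 != ' ' then acc.2.1 ++ [p.1 - 1] else acc.2.1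
  (starts, ends, p.2)

-- every word of text.split() is nonempty and whitespace-free
theorem pv_split₀_go_facts (cs : List Char) : ∀ (cur : List Char) (acc : List (List Char)),
    (∀ w ∈ acc, w ≠ [] ∧ ∀ c ∈ w, PySem.Chars.isspace c = false) →
    (∀ c ∈ cur, PySem.Chars.isspace c = false) →
    ∀ w ∈ PySem.Chars.split₀.go cs cur acc, w ≠ [] ∧ ∀ c ∈ w, PySem.Chars.isspace c = false := by
  induction cs with
  | nil =>
    intro cur acc hacc hcur w hw
    simp only [PySem.Chars.split₀.go] at hw
    split at hw
    · exact hacc w (by simpa using hw)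
    · rename_i h
      simp only [List.mem_reverse, List.mem_cons] at hw
      rcases hw with h1 | h2
      · subst h1
        refine ⟨by simpa [List.isEmpty_iff] using h, ?_⟩
        intro c hc; exact hcur c (by simpa using hc)
      · exact hacc w h2
  | cons c rest ih =>
    intro cur acc hacc hcur w hw
    simp only [PySem.Chars.split₀.go] at hw
    split at hw
    · split at hw
      · exact ih [] acc hacc (by simp) w hw
      · rename_i hsp hne
        refine ih [] (cur.reverse :: acc) ?_ (by simp) w hw
        intro v hv
        rcases List.mem_cons.mp hv with h1 | h2
        · subst h1
          exact ⟨by simpa [List.isEmpty_iff] using hne, fun d hd => hcur d (by simpa using hd)⟩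
        · exact hacc v h2
    · rename_i hsp
      refine ih (c :: cur) acc hacc ?_ w hw
      intro d hd
      rcases List.mem_cons.mp hd with h1 | h2
      · subst h1; simpa using hsp
      · exact hcur d h2

theorem pv_split₀_facts (cs : List Char) :
    ∀ w ∈ PySem.Chars.split₀ cs, w ≠ [] ∧ ∀ c ∈ w, PySem.Chars.isspace c = false :=
  pv_split₀_go_facts cs [] [] (by simp) (by simp)

-- A's loop produces the prefix-sum starts and derived ends
theorem pv_A_loop (ws : List String) : ∀ (s0 e0 : List Int) (pos : Int),
    ∃ p : Int,
      ws.foldl (fun (acc : List Int × List Int × Int × Int) palabra =>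
        ((acc.1 ++ [acc.2.2.1], acc.2.1 ++ [acc.2.2.2 + PySem.Str.len palabra + 1],
          acc.2.2.1 + PySem.Str.len palabra + 1, acc.2.2.2 + PySem.Str.len palabra + 1) :
          List Int × List Int × Int × Int)) (s0, e0, pos, pos - 2)
      = (s0 ++ pvS pos (ws.map String.toList),
         e0 ++ pvE pos (ws.map String.toList), p, p - 2) := by
  induction ws with
  | nil => intro s0 e0 pos; exact ⟨pos, by simp [pvS, pvE]⟩
  | cons w ws ih =>
    intro s0 e0 pos
    simp only [List.foldl_cons, PySem.Str.len_eq]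
    obtain ⟨p, hp⟩ := ih (s0 ++ [pos]) (e0 ++ [pos - 2 + w.toList.length + 1])
      (pos + w.toList.length + 1)
    simp only [PySem.Str.len_eq] at hp
    refine ⟨p, ?_⟩
    have h2 : pos - 2 + (w.toList.length : Int) + 1 = (pos + w.toList.length + 1) - 2 := by ring
    rw [show ((s0 ++ [pos], e0 ++ [pos - 2 + (w.toList.length : Int) + 1],
        pos + (w.toList.length : Int) + 1, pos - 2 + (w.toList.length : Int) + 1) :
        List Int × List Int × Int × Int)
      = (s0 ++ [pos], e0 ++ [pos - 2 + (w.toList.length : Int) + 1],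
        pos + (w.toList.length : Int) + 1, (pos + (w.toList.length : Int) + 1) - 2) from by rw [h2], hp]
    simp only [pvS, pvE, List.map_cons, List.append_assoc, List.singleton_append]
    rw [show pos - 2 + (w.toList.length : Int) + 1 = pos + w.toList.length - 1 from by ring]

theorem pv_nonspace_beq {c : Char} (h : PySem.Chars.isspace c = false) : (c == ' ') = false := by
  by_cases hc : c = ' '
  · subst hc; exact absurd h (by decide)
  · simp [hc]

-- scanning non-space characters with a non-space previous character only updates prev
theorem pv_scan_run (w : List Char) : ∀ (hw : ∀ c ∈ w, PySem.Chars.isspace c = false)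
    (p : Char) (hp : PySem.Chars.isspace p = false) (k : Int) (S E : List Int),
    (PySem.List.enumerate w k).foldl pvStep (S, E, p) = (S, E, w.getLastD p) := by
  induction w with
  | nil => intro _ p _ k S E; rfl
  | cons c cs ih =>
    intro hw p hp k S E
    rw [PySem.List.enumerate_cons, List.foldl_cons]
    have hc : PySem.Chars.isspace c = false := hw c (by simp)
    have h1 : (c == ' ') = false := pv_nonspace_beq hc
    have h2 : (p == ' ') = false := pv_nonspace_beq hp
    simp only [pvStep, bne, h1, h2, Bool.not_false, Bool.false_and, Bool.and_false,
      Bool.false_eq_true, if_false]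
    rw [ih (fun d hd => hw d (by simp [hd])) c hc (k + 1) S E]
    cases cs <;> simp [List.getLastD]

-- scanning one whole token from a space appends exactly its start
theorem pv_scan_block (c : Char) (cs : List Char)
    (hw : ∀ d ∈ c :: cs, PySem.Chars.isspace d = false) (k : Int) (S E : List Int) :
    (PySem.List.enumerate (c :: cs) k).foldl pvStep (S, E, ' ') = (S ++ [k], E, cs.getLastD c) := by
  rw [PySem.List.enumerate_cons, List.foldl_cons]
  have hc : PySem.Chars.isspace c = false := hw c (by simp)
  have h1 : (c == ' ') = false := pv_nonspace_beq hc
  simp only [pvStep, bne, h1, Bool.not_false, Bool.and_true, Bool.false_and,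
    beq_self_eq_true, Bool.false_eq_true, if_false, if_true]
  have := pv_scan_run cs (fun d hd => hw d (by simp [hd])) c hc (k + 1) (S ++ [k]) E
  simpa using this

theorem pvE_ne_nil (k : Int) (w : List Char) (ws : List (List Char)) : pvE k (w :: ws) ≠ [] := by
  simp [pvE]

-- the last end equals the length of the joined string minus one
theorem pvE_last (ws : List (List Char)) : ∀ (k : Int), ws ≠ [] →
    pvE k ws = (pvE k ws).dropLast ++ [k + ((PySem.Chars.join [' '] ws).length : Int) - 1] := by
  induction ws with
  | nil => simp
  | cons w ws ih =>
    intro k _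
    cases ws with
    | nil => simp [pvE, PySem.Chars.join_singleton]
    | cons v vs =>
      have hlen : (PySem.Chars.join [' '] (w :: v :: vs)).length
          = w.length + 1 + (PySem.Chars.join [' '] (v :: vs)).length := by
        rw [PySem.Chars.join_cons_cons]; simp [List.length_append]; omega
      have ihh := ih (k + w.length + 1) (by simp)
      have e1 : pvE k (w :: v :: vs)
          = (k + (w.length : Int) - 1) :: pvE (k + w.length + 1) (v :: vs) := rfl
      rw [e1, List.dropLast_cons_of_ne_nil (pvE_ne_nil _ v vs), hlen]
      conv_lhs => rw [ihh]
      simp only [List.cons_append, List.cons.injEq, true_and]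
      congr 2
      push_cast
      ring

-- B's scan over the joined tokens yields the prefix-sum starts and all ends but the last
theorem pv_scan_join (ws : List (List Char)) :
    ∀ (hws : ∀ w ∈ ws, w ≠ [] ∧ ∀ c ∈ w, PySem.Chars.isspace c = false)
    (k : Int) (S E : List Int), ws ≠ [] →
    ∃ c, PySem.Chars.isspace c = false ∧
      (PySem.List.enumerate (PySem.Chars.join [' '] ws) k).foldl pvStep (S, E, ' ')
        = (S ++ pvS k ws, E ++ (pvE k ws).dropLast, c) := by
  induction ws with
  | nil => simp
  | cons w ws ih =>
    intro hws k S E _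
    obtain ⟨hne, hsp⟩ := hws w (by simp)
    obtain ⟨c, cs, rfl⟩ : ∃ c cs, w = c :: cs := by
      cases w with
      | nil => exact absurd rfl hne
      | cons c cs => exact ⟨c, cs, rfl⟩
    cases ws with
    | nil =>
      refine ⟨cs.getLastD c, ?_, ?_⟩
      · exact hsp _ (by exact List.getLastD_mem_cons)
      · rw [PySem.Chars.join_singleton, pv_scan_block c cs hsp k S E]
        simp [pvS, pvE]
    | cons v vs =>
      rw [PySem.Chars.join_cons_cons]
      rw [show (c :: cs) ++ [' '] ++ PySem.Chars.join [' '] (v :: vs)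
            = (c :: cs) ++ (' ' :: PySem.Chars.join [' '] (v :: vs)) from by simp]
      rw [PySem.List.enumerate_append, List.foldl_append]
      rw [pv_scan_block c cs hsp k S E]
      rw [PySem.List.enumerate_cons, List.foldl_cons]
      have hlast : PySem.Chars.isspace (cs.getLastD c) = false :=
        hsp _ (by exact List.getLastD_mem_cons)
      have h1 : ((cs.getLastD c) == ' ') = false := pv_nonspace_beq hlast
      simp only [pvStep, bne, h1, beq_self_eq_true, Bool.not_true, Bool.false_and,
        Bool.not_false, Bool.and_true, Bool.false_eq_true, if_false, if_true]
      obtain ⟨d, hd, hfold⟩ := ih (fun u hu => hws u (by simp [hu])) (k + (c :: cs).length + 1)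
        (S ++ [k]) (E ++ [k + (c :: cs).length - 1]) (by simp)
      refine ⟨d, hd, ?_⟩
      rw [show (k + ((c :: cs).length : Int)) + 1 = k + (c :: cs).length + 1 from by ring]
      rw [show (k + ((c :: cs).length : Int)) - 1 = k + (c :: cs).length - 1 from by ring]
      rw [hfold]
      simp only [pvS, pvE, List.append_assoc, List.singleton_append]
      simp [List.dropLast_cons_of_ne_nil]

theorem pv_A_eq (text : String) :
    starts_ends_tokens text
      = (pvS 0 (PySem.Chars.split₀ text.toList), pvE 0 (PySem.Chars.split₀ text.toList)) := by
  unfold starts_ends_tokens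
  obtain ⟨p, hp⟩ := pv_A_loop (PySem.Str.split₀ text) [] [] 0
  rw [show (0 : Int) - 2 = -2 from by norm_num] at hp
  simp only [hp, List.nil_append]
  rw [PySem.Str.split₀_map_toList]

theorem pv_B_eq (text : String) :
    starts_ends_tokens_alt text
      = (pvS 0 (PySem.Chars.split₀ text.toList), pvE 0 (PySem.Chars.split₀ text.toList)) := by
  unfold starts_ends_tokens_alt
  have hstep : (fun (acc : List Int × List Int × Char) (p : Int × Char) =>
      let starts := if p.2 != ' ' && acc.2.2 == ' ' then acc.1 ++ [p.1] else acc.1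
      let ends := if p.2 == ' ' && acc.2.2 != ' ' then acc.2.1 ++ [p.1 - 1] else acc.2.1
      (starts, ends, p.2)) = pvStep := rfl
  have hs : (PySem.Str.join " " (PySem.Str.split₀ text)).toList
      = PySem.Chars.join [' '] (PySem.Chars.split₀ text.toList) := by
    rw [PySem.Str.toList_join, PySem.Str.split₀_map_toList]
    rfl
  simp only [hstep, PySem.Str.len_eq, hs]
  cases hT : PySem.Chars.split₀ text.toList with
  | nil => simp [PySem.Chars.join_nil, pvS, pvE, PySem.List.enumerate]
  | cons w ws =>
    obtain ⟨c, hc, hfold⟩ := pv_scan_join (w :: ws) (hT ▸ pv_split₀_facts text.toList) 0 [] []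
      (by simp)
    rw [hfold]
    have hcne : (c != ' ') = true := by
      simp [bne, pv_nonspace_beq hc]
    simp only [hcne, if_true, List.nil_append]
    conv_rhs => rw [pvE_last (w :: ws) 0 (by simp)]
    norm_num

-- ===== VERDICT (by name: the statement is the Claim_ definition above) =====
theorem starts_ends_tokens_spec : Claim_equal_starts_ends_tokens := by
  intro text _
  unfold Spec_starts_ends_tokens
  rw [pv_A_eq, pv_B_eq]
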